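-- pv_equiv track=rewrite | github.com/D-Nexus/Aprender-Python | Codigos Visual Studio Code/Clase13_B_Profe.py | votos_partido
-- ===== SOURCE A (Python) =====
-- def votos_partido(votos,partido):
--     i=0
--     p = ""
--     votos = votos+"$"
--     cont_votos = 0
--     while i<len(votos):
--         if votos[i]!="$":
--             p = p + votos[i]#
--         else:
--             if p == partido:
--                 cont_votos = cont_votos+1#1
--             p = ""
--         i=i+1#0->1->2->3->4->5->6->7
--     return cont_votos
-- ===== SOURCE B (Python) =====
-- def votos_partido(votos, partido):
--     return votos.split("$").count(partido)
-- ===== Notes on version B (the rewrite author's own statement) =====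
-- stated objective: faster
-- what changed: Replaces A's character-by-character streaming tokenizer (sentinel '$' appended, accumulator string rebuilt by concatenation, manual counter) with a single split("$") followed by list.count.
import Mathlib
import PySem

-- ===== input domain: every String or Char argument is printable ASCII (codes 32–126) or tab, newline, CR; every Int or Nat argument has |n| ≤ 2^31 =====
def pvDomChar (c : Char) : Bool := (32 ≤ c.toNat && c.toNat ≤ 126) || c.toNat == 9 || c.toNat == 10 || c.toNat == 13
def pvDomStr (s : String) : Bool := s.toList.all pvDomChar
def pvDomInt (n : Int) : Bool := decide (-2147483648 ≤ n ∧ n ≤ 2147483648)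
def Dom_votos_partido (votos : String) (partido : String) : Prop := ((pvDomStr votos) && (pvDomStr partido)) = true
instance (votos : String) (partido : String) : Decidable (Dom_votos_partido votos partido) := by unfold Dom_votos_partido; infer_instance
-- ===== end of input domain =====

-- B replaces A's character-by-character streaming tokenizer with split("$") + count (idiomatic).


-- ===== PORT A =====
-- A: append sentinel "$", scan char by char, accumulate segment p, count segments equal to partido.
-- (the segment accumulator p is kept as a List Char; comparison with partido.toList is Python's string equality)
def votos_partido (votos : String) (partido : String) : Int :=
  let vs := votos.toList ++ ['$']
  (vs.foldl (fun (st : List Char × Int) c =>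
      if c ≠ '$' then (st.1 ++ [c], st.2)
      else ([], if st.1 = partido.toList then st.2 + 1 else st.2))
    ([], 0)).2

-- ===== PORT B =====
-- B: votos.split("$").count(partido)
def votos_partido_alt (votos : String) (partido : String) : Int :=
  ((PySem.Chars.splitOn votos.toList "$".toList).count partido.toList : Int)

-- ===== PRECONDITION & SPEC =====
def Spec_votos_partido (votos : String) (partido : String) (out : Int) : Prop := out = votos_partido_alt votos partido
instance (votos : String) (partido : String) (out : Int) : Decidable (Spec_votos_partido votos partido out) := by unfold Spec_votos_partido; infer_instance

-- ===== CLAIM (what is proved, stated in full; the proofs are below) =====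
def Claim_equal_votos_partido : Prop := ∀ (votos : String) (partido : String), Dom_votos_partido votos partido → Spec_votos_partido votos partido (votos_partido votos partido)

-- ===== LEMMAS AND PROOFS =====

-- the segment list of l, with an open segment cur (in reverse) on the left
def pvSegs (l : List Char) (cur : List Char) : List (List Char) :=
  match l with
  | [] => [cur.reverse]
  | c :: rest => if c = '$' then cur.reverse :: pvSegs rest [] else pvSegs rest (c :: cur)

theorem pvGo_eq (fuel : Nat) (l cur : List Char) (acc : List (List Char))
    (h : l.length ≤ fuel) :
    PySem.Chars.splitOn.go ['$'] fuel l cur acc = acc.reverse ++ pvSegs l cur := by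
  induction fuel generalizing l cur acc with
  | zero =>
    have : l = [] := List.length_eq_zero_iff.mp (Nat.le_zero.mp h)
    subst this
    simp [PySem.Chars.splitOn.go, pvSegs]
  | succ n ih =>
    cases l with
    | nil => simp [PySem.Chars.splitOn.go, pvSegs]
    | cons c rest =>
      rw [PySem.Chars.splitOn.go]
      by_cases hc : c = '$'
      · subst hc
        simp only [List.isPrefixOf, Bool.and_true, beq_self_eq_true, if_pos, pvSegs,
          List.length_singleton, List.drop_one, List.tail_cons]
        rw [ih rest [] (cur.reverse :: acc) (by simpa using Nat.le_of_succ_le_succ h)]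
        simp
      · have hpre : ['$'].isPrefixOf (c :: rest) = false := by
          simp [List.isPrefixOf]
          intro hc'; exact hc hc'.symm
        rw [hpre]
        simp only [Bool.false_eq_true, if_false]
        rw [ih rest (c :: cur) acc (by simpa using Nat.le_of_succ_le_succ h)]
        simp [pvSegs, hc]

theorem pvSplitOn_eq (l : List Char) :
    PySem.Chars.splitOn l ['$'] = pvSegs l [] := by
  rw [PySem.Chars.splitOn]
  rw [pvGo_eq (l.length + 1) l [] [] (Nat.le_succ _)]
  simp

theorem pvFold_eq (t : String) (l cur : List Char) (cont : Int) :
    ((l ++ ['$']).foldl (fun (st : List Char × Int) c =>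
        if c ≠ '$' then (st.1 ++ [c], st.2)
        else ([], if st.1 = t.toList then st.2 + 1 else st.2))
      (cur.reverse, cont)).2
    = cont + ((pvSegs l cur).count t.toList : Int) := by
  induction l generalizing cur cont with
  | nil =>
    simp only [List.nil_append, List.foldl_cons, List.foldl_nil, pvSegs]
    by_cases h : cur.reverse = t.toList
    · simp [h]
    · simp [h]
  | cons c rest ih =>
    by_cases hc : c = '$'
    · subst hc
      simp only [List.cons_append, List.foldl_cons, ne_eq, not_true_eq_false, if_false,
        ]
      have := ih [] (if cur.reverse = t.toList then cont + 1 else cont)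
      simp only [List.reverse_nil] at this
      rw [this]
      simp only [pvSegs]
      by_cases h : cur.reverse = t.toList
      · simp [h]; ring
      · simp [fun e => h e]
    · simp only [List.cons_append, List.foldl_cons, ne_eq, hc, not_false_iff, if_pos]
      have hrev : cur.reverse ++ [c] = (c :: cur).reverse := by simp
      rw [hrev, ih (c :: cur) cont]
      simp [pvSegs, hc]

-- ===== VERDICT (by name: the statement is the Claim_ definition above) =====
theorem votos_partido_spec : Claim_equal_votos_partido := by
  intro votos partido _
  unfold Spec_votos_partido votos_partido votos_partido_alt
  have h := pvFold_eq partido votos.toList [] 0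
  simp only [List.reverse_nil] at h
  rw [h]
  have : "$".toList = ['$'] := rfl
  rw [this, pvSplitOn_eq]
  ring
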